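-- pv_equiv track=rewrite | github.com/mmb83/Graphical-Algorithmic-Projects | 4in1/magicalSquare.py | create_magic_square_even
-- ===== SOURCE A (Python) =====
-- def create_magic_square_even(n):
--     min , max = 1 , n**2
--     board = [[0] * n for _ in range(n)]
--     for i in range(n):
--         for j in range(n):
--             if(i==j):
--                 board[i][j] = max
--             elif((i+j) == n-1):
--                 board[i][j] = max
--             else:
--                 board[i][j] = min
--             min += 1
--             max -= 1
--     return board
-- ===== SOURCE B (Python) =====
-- def create_magic_square_even(n):
--     m = n * n + 1
--     board = [[i * n + j + 1 for j in range(n)] for i in range(n)]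
--     for i in range(n):
--         board[i][i] = m - board[i][i]
--         j = n - 1 - i
--         if j != i:
--             board[i][j] = m - board[i][j]
--     return board
-- ===== Notes on version B (the rewrite author's own statement) =====
-- stated objective: idiomatic
-- what changed: B replaces A's per-cell running min/max accumulators and triple-branch nested loop with the textbook method: fill the board row-major with sequential values via a comprehension, then complement only the two diagonal cells of each row (n*n+1 - v), guarding the center cell of odd n.
import Mathlib
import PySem

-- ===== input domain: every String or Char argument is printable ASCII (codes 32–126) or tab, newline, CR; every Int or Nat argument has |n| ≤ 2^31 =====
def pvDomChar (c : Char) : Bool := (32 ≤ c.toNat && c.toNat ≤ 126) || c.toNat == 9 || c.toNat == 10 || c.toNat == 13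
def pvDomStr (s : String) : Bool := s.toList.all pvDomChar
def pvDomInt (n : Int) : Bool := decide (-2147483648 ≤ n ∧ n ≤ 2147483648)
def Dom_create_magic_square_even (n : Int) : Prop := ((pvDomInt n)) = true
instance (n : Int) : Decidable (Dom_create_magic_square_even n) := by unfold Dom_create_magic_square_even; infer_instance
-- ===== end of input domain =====

-- B replaces A's running min/max accumulators by a sequential row-major fill followed by
-- complementing the two diagonal cells of each row (same cost; a more idiomatic decomposition).

-- ===== PORT A =====
-- one step of A's inner loop: assign board[i][j], bump min, drop max
def aStep (n i : Int) (st : Int × Int × List (List Int)) (j : Int) : Int × Int × List (List Int) :=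
  match st with
  | (mn, mx, b) =>
    let v := if i = j then mx else if i + j = n - 1 then mx else mn
    (mn + 1, mx - 1, b.set i.toNat ((b.getD i.toNat []).set j.toNat v))

def create_magic_square_even (n : Int) : List (List Int) :=
  let board := (PySem.List.pyRange 0 n 1).map (fun _ => PySem.List.pyRepeat [(0 : Int)] n)
  ((PySem.List.pyRange 0 n 1).foldl
    (fun st i => (PySem.List.pyRange 0 n 1).foldl (aStep n i) st)
    (1, n ^ 2, board)).2.2

-- ===== PORT B =====
-- body of B's fix-up loop: complement board[i][i] and, if distinct, board[i][n-1-i]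
def bFix (n m : Int) (b : List (List Int)) (i : Int) : List (List Int) :=
  let b1 := b.set i.toNat ((b.getD i.toNat []).set i.toNat (m - (b.getD i.toNat []).getD i.toNat 0))
  let j := n - 1 - i
  if j = i then b1
  else b1.set i.toNat ((b1.getD i.toNat []).set j.toNat (m - (b1.getD i.toNat []).getD j.toNat 0))

def create_magic_square_even_alt (n : Int) : List (List Int) :=
  let m := n * n + 1
  let board := (PySem.List.pyRange 0 n 1).map
    (fun i => (PySem.List.pyRange 0 n 1).map (fun j => i * n + j + 1))
  (PySem.List.pyRange 0 n 1).foldl (bFix n m) board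

-- ===== PRECONDITION & SPEC =====
def Spec_create_magic_square_even (n : Int) (out : List (List Int)) : Prop := out = create_magic_square_even_alt n
instance (n : Int) (out : List (List Int)) : Decidable (Spec_create_magic_square_even n out) := by unfold Spec_create_magic_square_even; infer_instance

-- ===== CLAIM (what is proved, stated in full; the proofs are below) =====
def Claim_equal_create_magic_square_even : Prop := ∀ (n : Int), Dom_create_magic_square_even n → Spec_create_magic_square_even n (create_magic_square_even n)

-- ===== LEMMAS AND PROOFS =====

-- the common closed form: cell (i,j) is n*n-(i*n+j) on a diagonal, i*n+j+1 otherwise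
def valF (n i j : Int) : Int := if i = j ∨ i + j = n - 1 then n * n - (i * n + j) else i * n + j + 1
def rowC (n i : Int) : List Int := (PySem.List.pyRange 0 n 1).map (valF n i)
def magicC (n : Int) : List (List Int) := (PySem.List.pyRange 0 n 1).map (rowC n)

-- B's initial row i
def rowB0 (n i : Int) : List Int := (PySem.List.pyRange 0 n 1).map (fun j => i * n + j + 1)

-- A's inner step, viewed on the single row it touches
def rowStepA (n i : Int) (st : Int × Int × List Int) (j : Int) : Int × Int × List Int :=
  match st with
  | (mn, mx, r) => (mn + 1, mx - 1, r.set j.toNat (if i = j then mx else if i + j = n - 1 then mx else mn))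

-- B's fix-up, viewed on the single row it touches
def rowFixB (n m i : Int) (r : List Int) : List Int :=
  let r1 := r.set i.toNat (m - r.getD i.toNat 0)
  if n - 1 - i = i then r1
  else r1.set (n - 1 - i).toNat (m - r1.getD (n - 1 - i).toNat 0)

lemma getD_map_pyRange {α : Type} (n : Int) (f : Int → α) (k : Nat) (d : α) (hk : (k : Int) < n) :
    ((PySem.List.pyRange 0 n 1).map f).getD k d = f (k : Int) := by
  simp [List.getD, hk]

lemma set_map_pyRange {α : Type} (n : Int) (f : Int → α) (k : Nat) (v : α) :
    ((PySem.List.pyRange 0 n 1).map f).set k v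
      = (PySem.List.pyRange 0 n 1).map (fun i => if i = (k : Int) then v else f i) := by
  apply List.ext_getElem
  · simp
  intro p h1 h2
  simp [PySem.List.length_pyRange_one] at h1
  rw [List.getElem_set]
  simp only [List.getElem_map, PySem.List.getElem_pyRange_one]
  split_ifs with h3 h4 h5 <;> simp_all

lemma aStep_to_row (n i : Int) (js : List Int) (mn mx : Int) (b : List (List Int))
    (hi : i.toNat < b.length) :
    js.foldl (aStep n i) (mn, mx, b)
      = ((js.foldl (rowStepA n i) (mn, mx, b.getD i.toNat [])).1,
         (js.foldl (rowStepA n i) (mn, mx, b.getD i.toNat [])).2.1,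
         b.set i.toNat (js.foldl (rowStepA n i) (mn, mx, b.getD i.toNat [])).2.2) := by
  induction js generalizing mn mx b with
  | nil =>
    simp [List.getD, List.getElem?_eq_getElem hi]
  | cons j rest ih =>
    simp only [List.foldl_cons, aStep, rowStepA]
    rw [ih _ _ _ (by simpa using hi)]
    simp [List.getD, hi, List.set_set]

lemma rowA_closed (n i : Int) (mn mx : Int) (r0 : List Int) (hr : r0.length = n.toNat)
    (m : Nat) (hm : (m : Int) ≤ n) :
    (PySem.List.pyRange 0 (m : Int) 1).foldl (rowStepA n i) (mn, mx, r0)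
      = (mn + m, mx - m,
         (PySem.List.pyRange 0 (m : Int) 1).map
           (fun j => if i = j then mx - j else if i + j = n - 1 then mx - j else mn + j)
           ++ r0.drop m) := by
  induction m with
  | zero => simp
  | succ k ih =>
    have hk : (k : Int) ≤ n := by push_cast at hm ⊢; omega
    have hrange : PySem.List.pyRange 0 ((k:Int)+1) 1 = PySem.List.pyRange 0 (k:Int) 1 ++ [(k:Int)] := by
      rw [PySem.List.pyRange_one_succ_right] ; omega
    push_cast
    rw [hrange, List.foldl_append, List.map_append, ih hk]
    simp only [List.foldl_cons, List.foldl_nil, rowStepA]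
    refine Prod.ext (by push_cast; ring) (Prod.ext (by push_cast; ring) ?_)
    have hklen : k < r0.length := by omega
    have hplen : ((PySem.List.pyRange 0 (k:Int) 1).map
        (fun j => if i = j then mx - j else if i + j = n - 1 then mx - j else mn + j)).length = k := by
      simp [PySem.List.length_pyRange_one]
    show (_ ++ r0.drop k).set (Int.toNat (k:Int)) _ = _
    rw [Int.toNat_natCast, List.set_append, hplen]
    simp only [lt_irrefl, Nat.sub_self, List.append_assoc]
    rw [List.drop_eq_getElem_cons hklen, List.set_cons_zero]
    simp

-- A's finished row i equals the closed form
lemma rowA_final (n i : Int) :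
    ((PySem.List.pyRange 0 n 1).map
      (fun j => if i = j then (n ^ 2 - i * n) - j else if i + j = n - 1 then (n ^ 2 - i * n) - j
                else (1 + i * n) + j))
      = rowC n i := by
  unfold rowC
  apply List.map_congr_left
  intro j hj
  simp only [valF]
  by_cases h1 : i = j
  · simp [h1]; ring
  · by_cases h2 : i + j = n - 1
    · simp [h1, h2]; ring
    · simp [h1, h2]; ring

lemma outerA (n : Int) (hn : 0 ≤ n) (m : Nat) (hm : (m : Int) ≤ n) :
    (PySem.List.pyRange 0 (m : Int) 1).foldl
        (fun st i => (PySem.List.pyRange 0 n 1).foldl (aStep n i) st)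
        (1, n ^ 2, (PySem.List.pyRange 0 n 1).map (fun _ => PySem.List.pyRepeat [(0 : Int)] n))
      = (1 + m * n, n ^ 2 - m * n,
         (PySem.List.pyRange 0 n 1).map
           (fun i => if i < (m : Int) then rowC n i else PySem.List.pyRepeat [(0 : Int)] n)) := by
  induction m with
  | zero =>
    simp only [Nat.cast_zero, zero_mul, add_zero, sub_zero]
    rw [show PySem.List.pyRange 0 (0:Int) 1 = [] from rfl]
    simp only [List.foldl_nil]
    refine congrArg _ (congrArg _ ?_)
    apply List.map_congr_left
    intro i hi
    rw [PySem.List.mem_pyRange_one] at hi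
    rw [if_neg (by omega)]
  | succ k ih =>
    have hk : (k : Int) ≤ n := by push_cast at hm ⊢; omega
    have hkn : (k : Int) < n := by push_cast at hm; omega
    have hrange : PySem.List.pyRange 0 ((k:Int)+1) 1 = PySem.List.pyRange 0 (k:Int) 1 ++ [(k:Int)] := by
      rw [PySem.List.pyRange_one_succ_right] ; omega
    push_cast
    rw [hrange, List.foldl_append, ih hk]
    simp only [List.foldl_cons, List.foldl_nil]
    have hlen : (Int.toNat (k:Int)) <
        ((PySem.List.pyRange 0 n 1).map
          (fun i => if i < (k : Int) then rowC n i else PySem.List.pyRepeat [(0 : Int)] n)).length := by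
      simp [PySem.List.length_pyRange_one]; omega
    rw [aStep_to_row n (k:Int) _ _ _ _ hlen]
    rw [Int.toNat_natCast, getD_map_pyRange n _ k [] hkn]
    rw [if_neg (lt_irrefl _)]
    have hreplen : (PySem.List.pyRepeat [(0 : Int)] n).length = n.toNat := by
      rw [PySem.List.pyRepeat_singleton]; simp
    have hnn : PySem.List.pyRange 0 ((n.toNat : Int)) 1 = PySem.List.pyRange 0 n 1 := by
      rw [Int.toNat_of_nonneg hn]
    have hrow := rowA_closed n (k:Int) (1 + k * n) (n ^ 2 - k * n)
        (PySem.List.pyRepeat [(0 : Int)] n) hreplen n.toNat (by omega)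
    rw [hnn] at hrow
    rw [hrow]
    simp only [List.drop_of_length_le (le_of_eq hreplen), List.append_nil]
    refine Prod.ext (by rw [Int.toNat_of_nonneg hn]; ring) (Prod.ext (by rw [Int.toNat_of_nonneg hn]; ring) ?_)
    rw [rowA_final n (k:Int), set_map_pyRange]
    apply List.map_congr_left
    intro i hi
    rw [PySem.List.mem_pyRange_one] at hi
    by_cases h1 : i = (k : Int)
    · rw [if_pos h1, if_pos (by omega), h1]
    · rw [if_neg h1]
      by_cases h2 : i < (k : Int)
      · rw [if_pos h2, if_pos (by omega)]
      · rw [if_neg h2, if_neg (by omega)]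

lemma A_eq_magicC (n : Int) : create_magic_square_even n = magicC n := by
  by_cases hn : 0 ≤ n
  · show ((PySem.List.pyRange 0 n 1).foldl
        (fun st i => (PySem.List.pyRange 0 n 1).foldl (aStep n i) st)
        (1, n ^ 2, (PySem.List.pyRange 0 n 1).map (fun _ => PySem.List.pyRepeat [(0 : Int)] n))).2.2
      = magicC n
    have h := outerA n hn n.toNat (by omega)
    rw [Int.toNat_of_nonneg hn] at h
    rw [h]
    apply List.map_congr_left
    intro i hi
    rw [PySem.List.mem_pyRange_one] at hi
    rw [if_pos (by omega)]
  · unfold create_magic_square_even magicC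
    rw [PySem.List.pyRange_one_eq_nil (by omega)]
    simp

lemma bFix_to_row (n m i : Int) (b : List (List Int)) (hi : i.toNat < b.length) :
    bFix n m b i = b.set i.toNat (rowFixB n m i (b.getD i.toNat [])) := by
  unfold bFix rowFixB
  by_cases h : n - 1 - i = i
  · simp [h]
  · simp only [if_neg h]
    simp [List.getD, hi, List.set_set]

lemma rowFixB_final (n i : Int) (h0 : 0 ≤ i) (hin : i < n) :
    rowFixB n (n * n + 1) i (rowB0 n i) = rowC n i := by
  unfold rowFixB rowB0
  have hi : ((i.toNat : Int)) = i := Int.toNat_of_nonneg h0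
  rw [show ((PySem.List.pyRange 0 n 1).map fun j => i * n + j + 1).getD i.toNat 0
        = i * n + (i.toNat : Int) + 1 from getD_map_pyRange n _ i.toNat 0 (by omega)]
  rw [set_map_pyRange, hi]
  by_cases h : n - 1 - i = i
  · rw [if_pos h]
    unfold rowC
    apply List.map_congr_left
    intro j hj
    rw [PySem.List.mem_pyRange_one] at hj
    simp only [valF]
    by_cases h1 : j = i
    · rw [if_pos h1, if_pos (Or.inl h1.symm), h1]; ring
    · rw [if_neg h1, if_neg (by omega)]
  · rw [if_neg h]
    have hj0 : (0:Int) ≤ n - 1 - i := by omega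
    have hjc : (((n - 1 - i).toNat : Int)) = n - 1 - i := Int.toNat_of_nonneg hj0
    rw [show ((PySem.List.pyRange 0 n 1).map
          fun j => if j = i then n * n + 1 - (i * n + i + 1) else i * n + j + 1).getD (n - 1 - i).toNat 0
        = (if ((n - 1 - i).toNat : Int) = i then n * n + 1 - (i * n + i + 1)
           else i * n + ((n - 1 - i).toNat : Int) + 1)
        from getD_map_pyRange n _ _ 0 (by omega)]
    rw [hjc, if_neg h]
    rw [set_map_pyRange, hjc]
    unfold rowC
    apply List.map_congr_left
    intro j hj
    rw [PySem.List.mem_pyRange_one] at hj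
    simp only [valF]
    by_cases h1 : j = n - 1 - i
    · rw [if_pos h1, if_pos (Or.inr (by omega)), h1]; ring
    · rw [if_neg h1]
      by_cases h2 : j = i
      · rw [if_pos h2, if_pos (Or.inl h2.symm), h2]; ring
      · rw [if_neg h2, if_neg (by omega)]

lemma outerB (n : Int) (m : Nat) (hm : (m : Int) ≤ n) :
    (PySem.List.pyRange 0 (m : Int) 1).foldl (bFix n (n * n + 1))
        ((PySem.List.pyRange 0 n 1).map (rowB0 n))
      = (PySem.List.pyRange 0 n 1).map
          (fun i => if i < (m : Int) then rowC n i else rowB0 n i) := by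
  induction m with
  | zero =>
    simp only [Nat.cast_zero]
    rw [show PySem.List.pyRange 0 (0:Int) 1 = [] from rfl]
    simp only [List.foldl_nil]
    apply List.map_congr_left
    intro i hi
    rw [PySem.List.mem_pyRange_one] at hi
    rw [if_neg (by omega)]
  | succ k ih =>
    have hk : (k : Int) ≤ n := by push_cast at hm ⊢; omega
    have hkn : (k : Int) < n := by push_cast at hm; omega
    have hrange : PySem.List.pyRange 0 ((k:Int)+1) 1 = PySem.List.pyRange 0 (k:Int) 1 ++ [(k:Int)] := by
      rw [PySem.List.pyRange_one_succ_right] ; omega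
    push_cast
    rw [hrange, List.foldl_append, ih hk]
    simp only [List.foldl_cons, List.foldl_nil]
    have hlen : (Int.toNat (k:Int)) <
        ((PySem.List.pyRange 0 n 1).map
          (fun i => if i < (k : Int) then rowC n i else rowB0 n i)).length := by
      simp [PySem.List.length_pyRange_one]; omega
    rw [bFix_to_row n _ (k:Int) _ hlen]
    rw [Int.toNat_natCast, getD_map_pyRange n _ k _ hkn]
    rw [if_neg (lt_irrefl _)]
    rw [rowFixB_final n (k:Int) (by omega) hkn, set_map_pyRange]
    apply List.map_congr_left
    intro i hi
    rw [PySem.List.mem_pyRange_one] at hi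
    by_cases h1 : i = (k : Int)
    · rw [if_pos h1, if_pos (by omega), h1]
    · rw [if_neg h1]
      by_cases h2 : i < (k : Int)
      · rw [if_pos h2, if_pos (by omega)]
      · rw [if_neg h2, if_neg (by omega)]

lemma B_eq_magicC (n : Int) : create_magic_square_even_alt n = magicC n := by
  by_cases hn : 0 ≤ n
  · unfold create_magic_square_even_alt
    have h := outerB n n.toNat (by omega)
    rw [Int.toNat_of_nonneg hn] at h
    show (PySem.List.pyRange 0 n 1).foldl (bFix n (n * n + 1))
        ((PySem.List.pyRange 0 n 1).map (rowB0 n)) = magicC n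
    rw [h]
    apply List.map_congr_left
    intro i hi
    rw [PySem.List.mem_pyRange_one] at hi
    rw [if_pos (by omega)]
  · unfold create_magic_square_even_alt magicC
    rw [PySem.List.pyRange_one_eq_nil (by omega)]
    simp

-- ===== VERDICT (by name: the statement is the Claim_ definition above) =====
theorem create_magic_square_even_spec : Claim_equal_create_magic_square_even := by
  intro n _
  show create_magic_square_even n = create_magic_square_even_alt n
  rw [A_eq_magicC, B_eq_magicC]
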